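-- pv_equiv track=rewrite | github.com/GammaPhi/gammaphi-contracts | board/con_chess_v1.py | get_intermediary_path
-- ===== SOURCE A (Python) =====
-- def get_intermediary_path(x1: int, y1: int, x2: int, y2: int) -> list:
--     vector = (x2 - x1, y2 - y1)
--     if vector[0] > 0 and vector[1] > 0:
--         assert vector[0] == vector[1], 'Invalid vector'
--         return [(x1 + i, y1 + i) for i in range(1, vector[0])]
--     elif vector[0] > 0 and vector[1] == 0:
--         return [(x1 + i, y1) for i in range(1, vector[0])]
--     elif vector[0] == 0 and vector[1] > 0:
--         return [(x1, y1 + i) for i in range(1, vector[1])]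
--     elif vector[0] < 0 and vector[1] < 0:
--         assert vector[0] == vector[1], 'Invalid vector'
--         return [(x1 - i, y1 - i) for i in range(1, -vector[0])]
--     elif vector[0] < 0 and vector[1] > 0:
--         assert vector[0] == -vector[1], 'Invalid vector'
--         return [(x1 - i, y1 + i) for i in range(1, vector[1])]
--     elif vector[0] > 0 and vector[1] < 0:
--         assert vector[0] == -vector[1], 'Invalid vector'
--         return [(x1 + i, y1 - i) for i in range(1, vector[0])]
--     elif vector[0] < 0 and vector[1] == 0:
--         return [(x1 - i, y1) for i in range(1, -vector[0])]
--     elif vector[0] == 0 and vector[1] < 0: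
--         return [(x1, y1 - i) for i in range(1, -vector[1])]
--     else:
--         assert False, 'Not a valid vector.'
-- ===== SOURCE B (Python) =====
-- def get_intermediary_path(x1: int, y1: int, x2: int, y2: int) -> list:
--     dx = x2 - x1
--     dy = y2 - y1
--     assert dx != 0 or dy != 0, 'Not a valid vector.'
--     if dx != 0 and dy != 0:
--         assert abs(dx) == abs(dy), 'Invalid vector'
--     sx = (dx > 0) - (dx < 0)
--     sy = (dy > 0) - (dy < 0)
--     # walk backwards from the destination toward the source, then reverse
--     path = []
--     x, y = x2, y2
--     while True:
--         x -= sx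
--         y -= sy
--         if (x, y) == (x1, y1):
--             break
--         path.append((x, y))
--     path.reverse()
--     return path
-- ===== Notes on version B (the rewrite author's own statement) =====
-- stated objective: alternative
-- what changed: Replaced the 8-way branch of ranged comprehensions by a single backward while-loop that steps from the destination toward the source along computed sign steps, accumulating squares and reversing the accumulator at the end.
import Mathlib
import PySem

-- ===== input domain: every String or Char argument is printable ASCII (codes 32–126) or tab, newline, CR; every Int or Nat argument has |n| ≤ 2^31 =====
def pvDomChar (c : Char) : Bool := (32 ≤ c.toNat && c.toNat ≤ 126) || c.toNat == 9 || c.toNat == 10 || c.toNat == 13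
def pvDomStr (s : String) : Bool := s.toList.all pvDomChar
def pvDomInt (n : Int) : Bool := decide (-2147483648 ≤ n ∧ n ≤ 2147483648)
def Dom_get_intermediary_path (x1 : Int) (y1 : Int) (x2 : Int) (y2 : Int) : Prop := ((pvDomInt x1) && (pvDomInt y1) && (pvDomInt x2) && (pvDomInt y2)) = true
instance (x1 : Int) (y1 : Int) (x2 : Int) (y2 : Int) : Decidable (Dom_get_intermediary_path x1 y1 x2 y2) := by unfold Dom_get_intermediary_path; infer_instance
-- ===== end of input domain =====

-- B replaces A's 8-way branch of ranged comprehensions by one backward walk from the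
-- destination with an accumulator and a final reverse (objective: alternative decomposition).

-- ===== PORT A =====
def get_intermediary_path (x1 : Int) (y1 : Int) (x2 : Int) (y2 : Int) : List (Int × Int) :=
  let vx : Int := x2 - x1
  let vy : Int := y2 - y1
  if vx > 0 ∧ vy > 0 then (PySem.List.pyRange 1 vx 1).map (fun i => (x1 + i, y1 + i))
  else if vx > 0 ∧ vy = 0 then (PySem.List.pyRange 1 vx 1).map (fun i => (x1 + i, y1))
  else if vx = 0 ∧ vy > 0 then (PySem.List.pyRange 1 vy 1).map (fun i => (x1, y1 + i))
  else if vx < 0 ∧ vy < 0 then (PySem.List.pyRange 1 (-vx) 1).map (fun i => (x1 - i, y1 - i))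
  else if vx < 0 ∧ vy > 0 then (PySem.List.pyRange 1 vy 1).map (fun i => (x1 - i, y1 + i))
  else if vx > 0 ∧ vy < 0 then (PySem.List.pyRange 1 vx 1).map (fun i => (x1 + i, y1 - i))
  else if vx < 0 ∧ vy = 0 then (PySem.List.pyRange 1 (-vx) 1).map (fun i => (x1 - i, y1))
  else if vx = 0 ∧ vy < 0 then (PySem.List.pyRange 1 (-vy) 1).map (fun i => (x1, y1 - i))
  else []  -- Python: assert False ('Not a valid vector.'); excluded by Pre_

-- ===== PORT B =====
-- The Python 'while True' loop: steps back from (x,y) by (sx,sy), breaks on reaching the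
-- source, appends each visited square. The fuel argument only makes the same loop total;
-- under Pre_ the loop reaches the source in exactly max(|dx|,|dy|) iterations.
def pvWalk (x1 : Int) (y1 : Int) (sx : Int) (sy : Int) (x : Int) (y : Int)
    (acc : List (Int × Int)) : Nat → List (Int × Int)
  | 0 => acc
  | fuel + 1 =>
    if x - sx = x1 ∧ y - sy = y1 then acc
    else pvWalk x1 y1 sx sy (x - sx) (y - sy) (acc ++ [(x - sx, y - sy)]) fuel

def get_intermediary_path_alt (x1 : Int) (y1 : Int) (x2 : Int) (y2 : Int) : List (Int × Int) :=
  -- Python B first asserts (dx,dy) ≠ (0,0) and, when both nonzero, |dx| = |dy|; excluded by Pre_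
  (pvWalk x1 y1
      ((if x2 - x1 > 0 then (1 : Int) else 0) - (if x2 - x1 < 0 then (1 : Int) else 0))
      ((if y2 - y1 > 0 then (1 : Int) else 0) - (if y2 - y1 < 0 then (1 : Int) else 0))
      x2 y2 [] (max |x2 - x1| |y2 - y1|).toNat).reverse

-- ===== PRECONDITION & SPEC =====
-- Pre_ excludes exactly the inputs where A's asserts fire (zero vector, or both components
-- nonzero with unequal magnitudes); B raises the same AssertionErrors there.
def Pre_get_intermediary_path (x1 : Int) (y1 : Int) (x2 : Int) (y2 : Int) : Prop :=
  ¬(x2 - x1 = 0 ∧ y2 - y1 = 0) ∧ (x2 - x1 = 0 ∨ y2 - y1 = 0 ∨ |x2 - x1| = |y2 - y1|)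
instance (x1 : Int) (y1 : Int) (x2 : Int) (y2 : Int) : Decidable (Pre_get_intermediary_path x1 y1 x2 y2) := by unfold Pre_get_intermediary_path; infer_instance
def pvWitness_get_intermediary_path : Int × Int × Int × Int := (0, 0, 3, 3)
def Spec_get_intermediary_path (x1 : Int) (y1 : Int) (x2 : Int) (y2 : Int) (out : List (Int × Int)) : Prop := out = get_intermediary_path_alt x1 y1 x2 y2
instance (x1 : Int) (y1 : Int) (x2 : Int) (y2 : Int) (out : List (Int × Int)) : Decidable (Spec_get_intermediary_path x1 y1 x2 y2 out) := by unfold Spec_get_intermediary_path; infer_instance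

-- ===== CLAIM (what is proved, stated in full; the proofs are below) =====
def Claim_equal_get_intermediary_path : Prop := ∀ (x1 : Int) (y1 : Int) (x2 : Int) (y2 : Int), Dom_get_intermediary_path x1 y1 x2 y2 → Pre_get_intermediary_path x1 y1 x2 y2 → Spec_get_intermediary_path x1 y1 x2 y2 (get_intermediary_path x1 y1 x2 y2)

-- ===== LEMMAS AND PROOFS =====

-- The backward walk, started at the point m+1 steps beyond the source with fuel m+1,
-- appends the squares at offsets m, m-1, …, 1 — i.e. the reversed range comprehension.
lemma walk_eq (x1 y1 sx sy : Int) (h : sx ≠ 0 ∨ sy ≠ 0) :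
    ∀ (m : Nat) (acc : List (Int × Int)),
      pvWalk x1 y1 sx sy (x1 + ((m : Int) + 1) * sx) (y1 + ((m : Int) + 1) * sy) acc (m + 1)
        = acc ++ ((PySem.List.pyRange 1 ((m : Int) + 1) 1).map
            (fun i => (x1 + i * sx, y1 + i * sy))).reverse := by
  intro m
  induction m with
  | zero =>
    intro acc
    simp only [pvWalk]
    simp [PySem.List.pyRange_one_eq_nil (le_refl (1 : Int))]
  | succ k ih =>
    intro acc
    have hx' : x1 + (((k + 1 : Nat) : Int) + 1) * sx - sx = x1 + ((k : Int) + 1) * sx := by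
      push_cast; ring
    have hy' : y1 + (((k + 1 : Nat) : Int) + 1) * sy - sy = y1 + ((k : Int) + 1) * sy := by
      push_cast; ring
    have hcond : ¬(x1 + ((k : Int) + 1) * sx = x1 ∧ y1 + ((k : Int) + 1) * sy = y1) := by
      rintro ⟨ha, hb⟩
      have hk : ((k : Int) + 1) ≠ 0 := by positivity
      rcases h with hsx | hsy
      · have : ((k : Int) + 1) * sx = 0 := by linarith
        rcases mul_eq_zero.mp this with h0 | h0
        · exact hk h0
        · exact hsx h0
      · have : ((k : Int) + 1) * sy = 0 := by linarith
        rcases mul_eq_zero.mp this with h0 | h0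
        · exact hk h0
        · exact hsy h0
    show pvWalk x1 y1 sx sy _ _ acc (k + 1 + 1) = _
    rw [pvWalk, hx', hy', if_neg hcond, ih]
    have hsplit : PySem.List.pyRange 1 (((k + 1 : Nat) : Int) + 1) 1
        = PySem.List.pyRange 1 ((k : Int) + 1) 1 ++ [(k : Int) + 1] := by
      have : (((k + 1 : Nat) : Int) + 1) = ((k : Int) + 1) + 1 := by push_cast; ring
      rw [this, PySem.List.pyRange_one_succ_right (by omega)]
    rw [hsplit]
    simp

-- Bridge: the reversed walk from (x2,y2) = source + n·(sx,sy) with fuel n is the forward range map.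
lemma walk_reverse_eq (x1 y1 sx sy x2 y2 n : Int) (hn : 1 ≤ n)
    (h : sx ≠ 0 ∨ sy ≠ 0) (hx : x2 = x1 + n * sx) (hy : y2 = y1 + n * sy) :
    (pvWalk x1 y1 sx sy x2 y2 [] n.toNat).reverse
      = (PySem.List.pyRange 1 n 1).map (fun i => (x1 + i * sx, y1 + i * sy)) := by
  obtain ⟨m, hm⟩ : ∃ m : Nat, n = (m : Int) + 1 := ⟨(n - 1).toNat, by omega⟩
  have ht : n.toNat = m + 1 := by omega
  rw [hx, hy, ht, hm, walk_eq x1 y1 sx sy h m []]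
  simp

-- ===== VERDICT (by name: the statement is the Claim_ definition above) =====
theorem get_intermediary_path_spec : Claim_equal_get_intermediary_path := by
  intro x1 y1 x2 y2 _ hpre
  obtain ⟨hnz, hmag⟩ := hpre
  unfold Spec_get_intermediary_path get_intermediary_path get_intermediary_path_alt
  rcases lt_trichotomy (x2 - x1) 0 with hx | hx | hx <;>
    rcases lt_trichotomy (y2 - y1) 0 with hy | hy | hy
  · -- vx < 0, vy < 0 (diagonal down-left)
    have habs : |x2 - x1| = |y2 - y1| := by rcases hmag with h | h | h <;> omega
    rw [if_neg (by omega), if_neg (by omega), if_neg (by omega), if_pos ⟨hx, hy⟩,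
      if_neg (by omega), if_pos hx, if_neg (by omega), if_pos hy,
      habs, abs_of_neg hy, max_self,
      walk_reverse_eq x1 y1 (0 - 1) (0 - 1) x2 y2 (-(y2 - y1)) (by omega)
        (Or.inl (by norm_num)) (by have := habs; rw [abs_of_neg hx, abs_of_neg hy] at this; ring_nf; omega) (by ring)]
    rw [show x2 - x1 = y2 - y1 by rw [abs_of_neg hx, abs_of_neg hy] at habs; omega]
    exact List.map_congr_left (fun i _ => by simp only [Prod.mk.injEq]; constructor <;> ring)
  · -- vx < 0, vy = 0 (left)
    rw [if_neg (by omega), if_neg (by omega), if_neg (by omega), if_neg (by omega),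
      if_neg (by omega), if_neg (by omega), if_pos ⟨hx, hy⟩,
      if_neg (by omega), if_pos hx, if_neg (by omega), if_neg (by omega),
      abs_of_neg hx, hy, abs_zero, max_eq_left (by omega),
      walk_reverse_eq x1 y1 (0 - 1) (0 - 0) x2 y2 (-(x2 - x1)) (by omega)
        (Or.inl (by norm_num)) (by ring) (by simp only [sub_self, mul_zero, add_zero]; omega)]
    exact List.map_congr_left (fun i _ => by simp only [Prod.mk.injEq]; constructor <;> ring)
  · -- vx < 0, vy > 0 (anti-diagonal up-left)
    have habs : |x2 - x1| = |y2 - y1| := by rcases hmag with h | h | h <;> omega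
    rw [if_neg (by omega), if_neg (by omega), if_neg (by omega), if_neg (by omega),
      if_pos ⟨hx, hy⟩,
      if_neg (by omega), if_pos hx, if_pos hy, if_neg (by omega),
      habs, abs_of_pos hy, max_self,
      walk_reverse_eq x1 y1 (0 - 1) (1 - 0) x2 y2 (y2 - y1) (by omega)
        (Or.inl (by norm_num)) (by have := habs; rw [abs_of_neg hx, abs_of_pos hy] at this; ring_nf; omega) (by ring)]
    exact List.map_congr_left (fun i _ => by simp only [Prod.mk.injEq]; constructor <;> ring)
  · -- vx = 0, vy < 0 (down)
    rw [if_neg (by omega), if_neg (by omega), if_neg (by omega), if_neg (by omega),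
      if_neg (by omega), if_neg (by omega), if_neg (by omega), if_pos ⟨hx, hy⟩,
      if_neg (by omega), if_neg (by omega), if_neg (by omega), if_pos hy,
      hx, abs_zero, abs_of_neg hy, max_eq_right (by omega),
      walk_reverse_eq x1 y1 (0 - 0) (0 - 1) x2 y2 (-(y2 - y1)) (by omega)
        (Or.inr (by norm_num)) (by simp only [sub_self, mul_zero, add_zero]; omega) (by ring)]
    exact List.map_congr_left (fun i _ => by simp only [Prod.mk.injEq]; constructor <;> ring)
  · -- vx = 0, vy = 0: excluded by Pre_
    exact absurd ⟨hx, hy⟩ hnz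
  · -- vx = 0, vy > 0 (up)
    rw [if_neg (by omega), if_neg (by omega), if_pos ⟨hx, hy⟩,
      if_neg (by omega), if_neg (by omega), if_pos hy, if_neg (by omega),
      hx, abs_zero, abs_of_pos hy, max_eq_right (by omega),
      walk_reverse_eq x1 y1 (0 - 0) (1 - 0) x2 y2 (y2 - y1) (by omega)
        (Or.inr (by norm_num)) (by simp only [sub_self, mul_zero, add_zero]; omega) (by ring)]
    exact List.map_congr_left (fun i _ => by simp only [Prod.mk.injEq]; constructor <;> ring)
  · -- vx > 0, vy < 0 (anti-diagonal down-right)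
    have habs : |x2 - x1| = |y2 - y1| := by rcases hmag with h | h | h <;> omega
    rw [if_neg (by omega), if_neg (by omega), if_neg (by omega), if_neg (by omega),
      if_neg (by omega), if_pos ⟨hx, hy⟩,
      if_pos hx, if_neg (by omega), if_neg (by omega), if_pos hy,
      habs, abs_of_neg hy, max_self,
      walk_reverse_eq x1 y1 (1 - 0) (0 - 1) x2 y2 (-(y2 - y1)) (by omega)
        (Or.inl (by norm_num)) (by have := habs; rw [abs_of_pos hx, abs_of_neg hy] at this; ring_nf; omega) (by ring)]
    rw [show x2 - x1 = -(y2 - y1) by rw [abs_of_pos hx, abs_of_neg hy] at habs; omega]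
    exact List.map_congr_left (fun i _ => by simp only [Prod.mk.injEq]; constructor <;> ring)
  · -- vx > 0, vy = 0 (right)
    rw [if_neg (by omega), if_pos ⟨hx, hy⟩,
      if_pos hx, if_neg (by omega), if_neg (by omega), if_neg (by omega),
      abs_of_pos hx, hy, abs_zero, max_eq_left (by omega),
      walk_reverse_eq x1 y1 (1 - 0) (0 - 0) x2 y2 (x2 - x1) (by omega)
        (Or.inl (by norm_num)) (by ring) (by simp only [sub_self, mul_zero, add_zero]; omega)]
    exact List.map_congr_left (fun i _ => by simp only [Prod.mk.injEq]; constructor <;> ring)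
  · -- vx > 0, vy > 0 (diagonal up-right)
    have habs : |x2 - x1| = |y2 - y1| := by rcases hmag with h | h | h <;> omega
    rw [if_pos ⟨hx, hy⟩,
      if_pos hx, if_neg (by omega), if_pos hy, if_neg (by omega),
      habs, abs_of_pos hy, max_self,
      walk_reverse_eq x1 y1 (1 - 0) (1 - 0) x2 y2 (y2 - y1) (by omega)
        (Or.inl (by norm_num)) (by have := habs; rw [abs_of_pos hx, abs_of_pos hy] at this; ring_nf; omega) (by ring)]
    rw [show x2 - x1 = y2 - y1 by rw [abs_of_pos hx, abs_of_pos hy] at habs; omega]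
    exact List.map_congr_left (fun i _ => by simp only [Prod.mk.injEq]; constructor <;> ring)
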